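-- pv_equiv track=rewrite | github.com/saya-zhandev/PureAura---AI | backend/models.py | _prioritize_actions
-- ===== SOURCE A (Python) =====
-- def _prioritize_actions(actions):
--     """
--     Prioritize actions based on severity
--     """
--     # Prioritization logic
--     priority_keywords = ['evacuate', 'mask', 'immediately', 'avoid outdoor']
--
--     prioritized = []
--     for action in actions:
--         if any(keyword in action.lower() for keyword in priority_keywords):
--             prioritized.insert(0, action)
--         else:
--             prioritized.append(action)
--
--     return list(dict.fromkeys(prioritized))[:3]  # Return top 3 unique actions
-- ===== SOURCE B (Python) =====
-- def _prioritize_actions(actions):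
--     priority_keywords = ['evacuate', 'mask', 'immediately', 'avoid outdoor']
--     acts = list(actions)
--
--     def is_priority(a):
--         al = a.lower()
--         return any(k in al for k in priority_keywords)
--
--     combined = [a for a in acts if is_priority(a)][::-1] \
--         + [a for a in acts if not is_priority(a)]
--     return list(dict.fromkeys(combined))[:3]
-- ===== Notes on version B (the rewrite author's own statement) =====
-- stated objective: alternative
-- what changed: Replaces the interleaving insert(0)/append accumulation loop by two filter passes (priority items reversed, then non-priority items) concatenated, followed by the same dedup-and-take-3.
import Mathlib
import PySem

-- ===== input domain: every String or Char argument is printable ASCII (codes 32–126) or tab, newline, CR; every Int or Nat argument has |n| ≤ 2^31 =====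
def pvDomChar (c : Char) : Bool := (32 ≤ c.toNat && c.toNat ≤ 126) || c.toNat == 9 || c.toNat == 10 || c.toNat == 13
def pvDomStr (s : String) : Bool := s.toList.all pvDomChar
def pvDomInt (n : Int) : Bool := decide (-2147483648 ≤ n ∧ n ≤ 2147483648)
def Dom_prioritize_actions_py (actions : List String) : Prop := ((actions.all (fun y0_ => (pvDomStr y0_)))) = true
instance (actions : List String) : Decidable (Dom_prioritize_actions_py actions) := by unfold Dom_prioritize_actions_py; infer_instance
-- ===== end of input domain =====

-- B replaces A's interleaving insert(0)/append loop by two filter passes concatenated (alternative decomposition, same result).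

-- ===== PORT A =====
-- A: loop over actions, prepending priority actions and appending the rest, then dedup and take 3.
def prioritize_actions_py (actions : List String) : List String :=
  let priority_keywords : List String := ["evacuate", "mask", "immediately", "avoid outdoor"]
  let prioritized : List String :=
    actions.foldl
      (fun prioritized action =>
        if priority_keywords.any (fun keyword => PySem.Str.isIn keyword (PySem.Str.lower action)) then
          action :: prioritized            -- prioritized.insert(0, action)
        else
          prioritized ++ [action])         -- prioritized.append(action)
      []
  (PySem.List.dedup prioritized).take 3    -- list(dict.fromkeys(prioritized))[:3]

-- ===== PORT B =====
def pvIsPriority (a : String) : Bool :=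
  let al := PySem.Str.lower a
  (["evacuate", "mask", "immediately", "avoid outdoor"] : List String).any
    (fun k => PySem.Str.isIn k al)

def prioritize_actions_py_alt (actions : List String) : List String :=
  let acts := actions
  let combined :=
    (acts.filter (fun a => pvIsPriority a)).reverse
      ++ acts.filter (fun a => !pvIsPriority a)
  (PySem.List.dedup combined).take 3

-- ===== PRECONDITION & SPEC =====
def Spec_prioritize_actions_py (actions : List String) (out : List String) : Prop := out = prioritize_actions_py_alt actions
instance (actions : List String) (out : List String) : Decidable (Spec_prioritize_actions_py actions out) := by unfold Spec_prioritize_actions_py; infer_instance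

-- ===== CLAIM (what is proved, stated in full; the proofs are below) =====
def Claim_equal_prioritize_actions_py : Prop := ∀ (actions : List String), Dom_prioritize_actions_py actions → Spec_prioritize_actions_py actions (prioritize_actions_py actions)

-- ===== LEMMAS AND PROOFS =====

-- A's loop invariant: the accumulator is (reversed priorities) ++ (non-priorities).
lemma pvLoop_eq (p : String → Bool) :
    ∀ (xs r s : List String),
      xs.foldl (fun pr a => if p a then a :: pr else pr ++ [a]) (r ++ s)
        = ((xs.filter (fun a => p a)).reverse ++ r) ++ (s ++ xs.filter (fun a => !p a)) := by
  intro xs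
  induction xs with
  | nil => simp
  | cons a xs ih =>
    intro r s
    by_cases h : p a = true
    · rw [List.foldl_cons, if_pos h, show a :: (r ++ s) = (a :: r) ++ s from rfl,
        ih (a :: r) s]
      simp [h]
    · rw [List.foldl_cons, if_neg h, show (r ++ s) ++ [a] = r ++ (s ++ [a]) by simp,
        ih r (s ++ [a])]
      simp [h]

-- ===== VERDICT (by name: the statement is the Claim_ definition above) =====
theorem prioritize_actions_py_spec : Claim_equal_prioritize_actions_py := by
  intro actions _
  show prioritize_actions_py actions = prioritize_actions_py_alt actions
  unfold prioritize_actions_py prioritize_actions_py_alt pvIsPriority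
  have := pvLoop_eq
    (fun a => (["evacuate", "mask", "immediately", "avoid outdoor"] : List String).any
      (fun k => PySem.Str.isIn k (PySem.Str.lower a)))
    actions [] []
  simp only [List.nil_append, List.append_nil] at this
  simp only [this]
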